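-- pv_equiv track=rewrite | github.com/vnikov/Fall-2017 | CS111/PS8/ps8partI/ps8pr2.py | inner_grid
-- ===== SOURCE A (Python) =====
-- def create_grid(height, width):
--     """ creates and returns a 2-D list of 0s with the specified dimensions.
--         inputs: height and width are non-negative integers
--     """
--     grid = []
--
--     for r in range(height):
--         row = [0] * width     # a row containing width 0s
--         grid += [row]
--
--     return grid
--
-- def inner_grid(height, width, digit):
--     """ returns a 2-D list of height rows and width columns in which the
--     “inner” cells all have a value of digit and the cells on the outer border
--     are all 0 """
--     grid = create_grid(height, width)
--     for r in range(height):
--         for c in range(width):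
--             if r == 0 or r == height - 1 or c == 0 or c == width - 1:
--                 grid[r][c] = 0
--             else:
--                 grid[r][c] = digit
--     return grid
-- ===== SOURCE B (Python) =====
-- def inner_grid(height, width, digit):
--     """Row-template construction: each row is built whole from its class
--     (border row / inner row) instead of cell-by-cell overwrite."""
--     def row(r):
--         if r == 0 or r == height - 1 or width < 3:
--             return [0] * width
--         return [0] + [digit] * (width - 2) + [0]
--     return [row(r) for r in range(height)]
-- ===== Notes on version B (the rewrite author's own statement) =====
-- stated objective: simpler
-- what changed: Replaces create_grid plus a nested per-cell border test and in-place overwrite with a single comprehension that builds each row whole from a row-level template ([0]*width for border rows, [0]+[digit]*(width-2)+[0] for inner rows).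
import Mathlib
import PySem

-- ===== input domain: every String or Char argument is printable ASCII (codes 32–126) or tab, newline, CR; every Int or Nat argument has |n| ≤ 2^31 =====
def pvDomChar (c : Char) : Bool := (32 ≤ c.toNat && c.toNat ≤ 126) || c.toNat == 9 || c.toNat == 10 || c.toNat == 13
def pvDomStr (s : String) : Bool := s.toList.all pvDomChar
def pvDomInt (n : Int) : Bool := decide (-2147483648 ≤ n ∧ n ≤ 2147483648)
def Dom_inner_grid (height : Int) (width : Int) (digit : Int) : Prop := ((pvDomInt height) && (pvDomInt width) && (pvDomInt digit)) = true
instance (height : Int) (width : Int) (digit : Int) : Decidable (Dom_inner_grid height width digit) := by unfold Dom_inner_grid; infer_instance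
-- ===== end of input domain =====

-- B builds each row whole from a row-level template instead of A's per-cell border test and overwrite; same exact output.

-- ===== PORT A =====
-- create_grid: appends a fresh row [0]*width for each r in range(height)
def create_grid (height : Int) (width : Int) : List (List Int) :=
  (PySem.List.pyRange 0 height 1).foldl
    (fun grid _ => grid ++ [List.replicate width.toNat 0]) []

-- nested loops; grid[r][c] = v becomes set at r.toNat/c.toNat (r, c from range are nonnegative and in bounds)
def inner_grid (height : Int) (width : Int) (digit : Int) : List (List Int) :=
  (PySem.List.pyRange 0 height 1).foldl
    (fun grid r =>
      (PySem.List.pyRange 0 width 1).foldl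
        (fun grid c =>
          grid.set r.toNat ((grid.getD r.toNat []).set c.toNat
            (if r = 0 ∨ r = height - 1 ∨ c = 0 ∨ c = width - 1 then 0 else digit)))
        grid)
    (create_grid height width)

-- ===== PORT B =====
def bRow (height : Int) (width : Int) (digit : Int) (r : Int) : List Int :=
  if r = 0 ∨ r = height - 1 ∨ width < 3 then List.replicate width.toNat 0
  else [0] ++ List.replicate (width - 2).toNat digit ++ [0]

def inner_grid_alt (height : Int) (width : Int) (digit : Int) : List (List Int) :=
  (PySem.List.pyRange 0 height 1).map (bRow height width digit)

-- ===== PRECONDITION & SPEC =====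
def Spec_inner_grid (height : Int) (width : Int) (digit : Int) (out : List (List Int)) : Prop := out = inner_grid_alt height width digit
instance (height : Int) (width : Int) (digit : Int) (out : List (List Int)) : Decidable (Spec_inner_grid height width digit out) := by unfold Spec_inner_grid; infer_instance

-- ===== CLAIM (what is proved, stated in full; the proofs are below) =====
def Claim_equal_inner_grid : Prop := ∀ (height : Int) (width : Int) (digit : Int), Dom_inner_grid height width digit → Spec_inner_grid height width digit (inner_grid height width digit)

-- ===== LEMMAS AND PROOFS =====

theorem pv_pyRange_toNat (a : Int) : PySem.List.pyRange 0 a 1 = PySem.List.pyRange 0 (a.toNat : Int) 1 := by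
  by_cases h : 0 ≤ a
  · rw [Int.toNat_of_nonneg h]
  · rw [PySem.List.pyRange_one_eq_nil (by omega), PySem.List.pyRange_one_eq_nil (by omega)]

theorem pv_foldl_snoc {α β : Type} (l : List α) (init : List β) (x : β) :
    l.foldl (fun g _ => g ++ [x]) init = init ++ List.replicate l.length x := by
  induction l generalizing init with
  | nil => simp
  | cons a t ih =>
      simp only [List.foldl_cons, ih, List.length_cons]
      rw [List.append_assoc]
      rfl

theorem pv_create_grid_eq (h w : Int) :
    create_grid h w = List.replicate h.toNat (List.replicate w.toNat 0) := by
  unfold create_grid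
  rw [pv_foldl_snoc, PySem.List.length_pyRange_one]
  simp

-- the inner c-loop only touches row rn; it factors through a fold on that row
theorem pv_inner_factor (f : Int → Int) (cs : List Int) :
    ∀ (g : List (List Int)) (rn : Nat), rn < g.length →
    cs.foldl (fun g c => g.set rn ((g.getD rn []).set c.toNat (f c))) g
      = g.set rn (cs.foldl (fun row c => row.set c.toNat (f c)) (g.getD rn [])) := by
  induction cs with
  | nil =>
      intro g rn hrn
      simp only [List.foldl_nil]
      rw [List.getD_eq_getElem _ _ hrn]
      exact (List.set_getElem_self hrn).symm
  | cons c t ih =>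
      intro g rn hrn
      simp only [List.foldl_cons]
      rw [ih _ rn (by simpa using hrn), List.set_set]
      congr 1
      rw [List.getD_eq_getElem _ _ (by simpa using hrn)]
      simp

-- folding set over range n fills the first n cells with f
theorem pv_set_fold (f : Int → Int) :
    ∀ (n : Nat) (row : List Int), n ≤ row.length →
    (PySem.List.pyRange 0 (n : Int) 1).foldl (fun row c => row.set c.toNat (f c)) row
      = (List.range n).map (fun (k : Nat) => f (k : Int)) ++ row.drop n := by
  intro n
  induction n with
  | zero => intro row _; simp [PySem.List.pyRange_one_eq_nil]
  | succ n ih =>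
      intro row hlen
      have hcast : ((n + 1 : Nat) : Int) = (n : Int) + 1 := by push_cast; ring
      rw [hcast, PySem.List.pyRange_one_succ_right (by positivity), List.foldl_append]
      rw [ih row (by omega)]
      have hd : row.drop n = row[n] :: row.drop (n + 1) := List.drop_eq_getElem_cons (by omega)
      simp only [List.foldl_cons, List.foldl_nil, Int.toNat_natCast]
      rw [hd, List.set_append]
      simp only [List.length_map, List.length_range, Nat.lt_irrefl, if_false, Nat.sub_self,
        List.set_cons_zero, List.range_succ, List.map_append, List.map_cons, List.map_nil,
        List.append_assoc, List.cons_append, List.nil_append]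

theorem pv_grid_fold (h w d : Int) :
    ∀ (n : Nat) (g : List (List Int)), n ≤ g.length → (∀ row ∈ g, row.length = w.toNat) →
    (PySem.List.pyRange 0 (n : Int) 1).foldl
      (fun grid r =>
        (PySem.List.pyRange 0 w 1).foldl
          (fun grid c =>
            grid.set r.toNat ((grid.getD r.toNat []).set c.toNat
              (if r = 0 ∨ r = h - 1 ∨ c = 0 ∨ c = w - 1 then 0 else d)))
          grid)
      g
    = (List.range n).map (fun (rn : Nat) =>
        (List.range w.toNat).map (fun (k : Nat) =>
          if (rn : Int) = 0 ∨ (rn : Int) = h - 1 ∨ (k : Int) = 0 ∨ (k : Int) = w - 1 then 0 else d))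
        ++ g.drop n := by
  intro n
  induction n with
  | zero => intro g _ _; simp [PySem.List.pyRange_one_eq_nil]
  | succ n ih =>
      intro g hlen hrows
      have hcast : ((n + 1 : Nat) : Int) = (n : Int) + 1 := by push_cast; ring
      rw [hcast, PySem.List.pyRange_one_succ_right (by positivity), List.foldl_append]
      rw [ih g (by omega) hrows]
      set G := (List.range n).map (fun (rn : Nat) =>
        (List.range w.toNat).map (fun (k : Nat) =>
          if (rn : Int) = 0 ∨ (rn : Int) = h - 1 ∨ (k : Int) = 0 ∨ (k : Int) = w - 1 then 0 else d))
        ++ g.drop n with hG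
      have hGlen : G.length = g.length := by simp [hG]; omega
      have hnG : n < G.length := by omega
      simp only [List.foldl_cons, List.foldl_nil]
      rw [pv_pyRange_toNat w, pv_inner_factor _ _ G ((n : Int).toNat) (by simpa using hnG)]
      have hml : ((List.range n).map (fun (rn : Nat) =>
          (List.range w.toNat).map (fun (k : Nat) =>
            if (rn : Int) = 0 ∨ (rn : Int) = h - 1 ∨ (k : Int) = 0 ∨ (k : Int) = w - 1 then (0:Int) else d))).length = n := by
        simp
      have hval : G.getD n [] = g[n]'(by omega) := by
        rw [hG, List.getD_eq_getElem?_getD, List.getElem?_append_right (le_of_eq hml), hml,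
          Nat.sub_self, List.getElem?_drop, Nat.add_zero,
          List.getElem?_eq_getElem (show n < g.length by omega)]
        rfl
      have hrowlen : (G.getD ((n : Int).toNat) []).length = w.toNat := by
        rw [Int.toNat_natCast, hval]
        exact hrows _ (List.getElem_mem _)
      rw [pv_set_fold _ _ _ (le_of_eq hrowlen.symm)]
      have hdrop : (G.getD ((n : Int).toNat) []).drop w.toNat = [] :=
        List.drop_eq_nil_of_le (le_of_eq hrowlen)
      rw [hdrop, List.append_nil]
      have hd : g.drop n = g[n] :: g.drop (n + 1) := List.drop_eq_getElem_cons (by omega)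
      rw [Int.toNat_natCast, hG, hd, List.set_append]
      simp only [List.length_map, List.length_range, Nat.lt_irrefl, if_false, Nat.sub_self,
        List.set_cons_zero, List.range_succ, List.map_append, List.map_cons, List.map_nil,
        List.append_assoc, List.cons_append, List.nil_append]

-- A's cell value row equals B's row template, for any row index below height
theorem pv_row_eq (h w d : Int) (rn : Nat) :
    (List.range w.toNat).map (fun (k : Nat) =>
        if (rn : Int) = 0 ∨ (rn : Int) = h - 1 ∨ (k : Int) = 0 ∨ (k : Int) = w - 1 then 0 else d)
      = bRow h w d rn := by
  unfold bRow
  split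
  · next hP =>
      rw [List.eq_replicate_iff]
      refine ⟨by simp, ?_⟩
      intro x hx
      rcases List.mem_map.mp hx with ⟨k, hk, hxk⟩
      have hk' := List.mem_range.mp hk
      rw [← hxk]
      rw [if_pos]
      rcases hP with h1 | h1 | h1
      · exact Or.inl h1
      · exact Or.inr (Or.inl h1)
      · right; right; omega
  · next hP =>
      have h0 : ¬((rn : Int) = 0) := fun hh => hP (Or.inl hh)
      have h1 : ¬((rn : Int) = h - 1) := fun hh => hP (Or.inr (Or.inl hh))
      have h3 : (3 : Int) ≤ w := by
        have := fun hh => hP (Or.inr (Or.inr hh)); omega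
      apply List.ext_getElem
      · simp; omega
      · intro i hi hi'
        have him : i < w.toNat := by simpa using hi
        simp only [List.getElem_map, List.getElem_range]
        rcases Nat.eq_zero_or_pos i with hiz | hipos
        · subst hiz
          rw [if_pos (Or.inr (Or.inr (Or.inl (by norm_num))))]
          simp
        · obtain ⟨j, rfl⟩ : ∃ j, i = j + 1 := ⟨i - 1, by omega⟩
          by_cases hj : j < (w - 2).toNat
          · have hcond : ¬((rn : Int) = 0 ∨ (rn : Int) = h - 1 ∨
                ((j + 1 : Nat) : Int) = 0 ∨ ((j + 1 : Nat) : Int) = w - 1) := by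
              simp only [not_or]
              exact ⟨h0, h1, by push_cast; omega, by push_cast; omega⟩
            rw [if_neg hcond]
            simp [hj]
          · have hj' : j = (w - 2).toNat := by omega
            rw [if_pos (Or.inr (Or.inr (Or.inr (by push_cast; omega))))]
            subst hj'
            simp

-- ===== VERDICT (by name: the statement is the Claim_ definition above) =====
theorem inner_grid_spec : Claim_equal_inner_grid := by
  intro h w d _
  unfold Spec_inner_grid inner_grid inner_grid_alt
  rw [pv_create_grid_eq, pv_pyRange_toNat h, pv_grid_fold h w d h.toNat
    (List.replicate h.toNat (List.replicate w.toNat 0)) (by simp)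
    (by intro row hr; rw [List.eq_of_mem_replicate hr]; simp)]
  rw [List.drop_eq_nil_of_le (by simp), List.append_nil,
    PySem.List.pyRange_one]
  simp only [Int.sub_zero, Int.toNat_natCast, List.map_map]
  apply List.map_congr_left
  intro rn _
  simp only [Function.comp, zero_add]
  rw [pv_row_eq]
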